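-- pv_equiv track=rewrite | github.com/security-force-monitor/sfm-graph-extractor | PACKAGE/KGE_package/extract_sfm/parse.py | get_node_ids
-- ===== SOURCE A (Python) =====
-- def get_node_ids(parse_tree, word_position):
--     cur_position = 0
--     node_ids = []
--     for node in parse_tree:
--         if word_position[0]-1 <= cur_position and \
--             cur_position + len(node[1]) <= word_position[1]+1:
--             node_ids.append(node[0])
--         cur_position += len(node[1]) + 1
--     return node_ids
-- ===== SOURCE B (Python) =====
-- def get_node_ids(parse_tree, word_position):
--     # Walk the tree BACK-TO-FRONT: start from the total extent, derive each
--     # node's start by subtracting as we go, collect matches in reverse and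
--     # flip once at the end.
--     end = sum(len(s) + 1 for _, s in parse_tree)
--     lo = word_position[0] - 1
--     hi = word_position[1] + 1
--     out = []
--     for node_id, s in reversed(parse_tree):
--         end -= len(s) + 1
--         if lo <= end and end + len(s) <= hi:
--             out.append(node_id)
--     out.reverse()
--     return out
-- ===== Notes on version B (the rewrite author's own statement) =====
-- stated objective: alternative
-- what changed: B traverses the list back-to-front: it first computes the total extent, then walks reversed(parse_tree) deriving each node's start by subtracting its width from a running end position, collecting matching ids in reverse and flipping the result once at the end, instead of A's forward loop that threads a running start position.
import Mathlib
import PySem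

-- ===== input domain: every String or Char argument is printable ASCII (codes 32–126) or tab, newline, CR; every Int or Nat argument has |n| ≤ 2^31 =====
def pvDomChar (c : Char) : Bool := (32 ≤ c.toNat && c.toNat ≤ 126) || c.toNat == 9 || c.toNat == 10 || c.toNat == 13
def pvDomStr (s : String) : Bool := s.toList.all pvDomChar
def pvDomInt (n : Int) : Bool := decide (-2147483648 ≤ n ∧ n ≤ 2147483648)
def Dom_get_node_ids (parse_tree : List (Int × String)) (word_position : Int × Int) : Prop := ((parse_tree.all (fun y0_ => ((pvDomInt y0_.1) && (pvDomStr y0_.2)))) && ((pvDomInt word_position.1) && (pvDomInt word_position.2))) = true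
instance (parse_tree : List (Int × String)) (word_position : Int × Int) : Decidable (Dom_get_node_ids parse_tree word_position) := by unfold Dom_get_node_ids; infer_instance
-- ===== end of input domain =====

-- B walks the list back-to-front, deriving starts by subtraction from the total extent and
-- reversing the collected ids once at the end (alternative decomposition, same cost).

-- ===== PORT A =====
-- A: one forward loop threading (cur_position, node_ids).
def get_node_ids (parse_tree : List (Int × String)) (word_position : Int × Int) : List Int :=
  (parse_tree.foldl (fun (st : Int × List Int) node =>
      let acc := if word_position.1 - 1 ≤ st.1 ∧ st.1 + (PySem.Str.len node.2 : Int) ≤ word_position.2 + 1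
                 then st.2 ++ [node.1] else st.2
      (st.1 + (PySem.Str.len node.2 : Int) + 1, acc)) (0, [])).2

-- ===== PORT B =====
-- B: total extent, reversed walk threading the running end position, final reverse.
def get_node_ids_alt (parse_tree : List (Int × String)) (word_position : Int × Int) : List Int :=
  let total : Int := parse_tree.foldl (fun acc node => acc + (PySem.Str.len node.2 : Int) + 1) 0
  let lo := word_position.1 - 1
  let hi := word_position.2 + 1
  let st := parse_tree.reverse.foldl (fun (s : Int × List Int) node =>
      let e := s.1 - ((PySem.Str.len node.2 : Int) + 1)
      (e, if lo ≤ e ∧ e + (PySem.Str.len node.2 : Int) ≤ hi then s.2 ++ [node.1] else s.2))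
      (total, [])
  st.2.reverse

-- ===== PRECONDITION & SPEC =====
def Spec_get_node_ids (parse_tree : List (Int × String)) (word_position : Int × Int) (out : List Int) : Prop := out = get_node_ids_alt parse_tree word_position
instance (parse_tree : List (Int × String)) (word_position : Int × Int) (out : List Int) : Decidable (Spec_get_node_ids parse_tree word_position out) := by unfold Spec_get_node_ids; infer_instance

-- ===== CLAIM (what is proved, stated in full; the proofs are below) =====
def Claim_equal_get_node_ids : Prop := ∀ (parse_tree : List (Int × String)) (word_position : Int × Int), Dom_get_node_ids parse_tree word_position → Spec_get_node_ids parse_tree word_position (get_node_ids parse_tree word_position)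

-- ===== LEMMAS AND PROOFS =====

-- reference recursion: ids of nodes whose block starting at c fits in [lo, hi]
def pvGo (pt : List (Int × String)) (lo hi c : Int) : List Int :=
  match pt with
  | [] => []
  | (id, s) :: rest =>
      (if lo ≤ c ∧ c + (PySem.Str.len s : Int) ≤ hi then [id] else []) ++
      pvGo rest lo hi (c + (PySem.Str.len s : Int) + 1)

-- total extent of a list of nodes
def pvS (pt : List (Int × String)) : Int :=
  (pt.map (fun node => (PySem.Str.len node.2 : Int) + 1)).sum

theorem pvA_go (pt : List (Int × String)) (lo hi : Int) (c : Int) (acc : List Int) :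
    (pt.foldl (fun (st : Int × List Int) node =>
        let acc := if lo ≤ st.1 ∧ st.1 + (PySem.Str.len node.2 : Int) ≤ hi
                   then st.2 ++ [node.1] else st.2
        (st.1 + (PySem.Str.len node.2 : Int) + 1, acc)) (c, acc)).2
      = acc ++ pvGo pt lo hi c := by
  induction pt generalizing c acc with
  | nil => simp [pvGo]
  | cons hd tl ih =>
      obtain ⟨id, s⟩ := hd
      simp only [List.foldl_cons, pvGo, ih]
      split_ifs <;> simp

theorem pvTotal (pt : List (Int × String)) (c : Int) :
    pt.foldl (fun acc node => acc + (PySem.Str.len node.2 : Int) + 1) c = c + pvS pt := by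
  induction pt generalizing c with
  | nil => simp [pvS]
  | cons hd tl ih =>
      rw [List.foldl_cons, ih]
      simp [pvS, List.sum_cons]
      ring

theorem pvB_go (pt : List (Int × String)) (lo hi c : Int) (acc : List Int) :
    pt.reverse.foldl (fun (s : Int × List Int) node =>
        let e := s.1 - ((PySem.Str.len node.2 : Int) + 1)
        (e, if lo ≤ e ∧ e + (PySem.Str.len node.2 : Int) ≤ hi then s.2 ++ [node.1] else s.2))
        (c + pvS pt, acc)
      = (c, acc ++ (pvGo pt lo hi c).reverse) := by
  induction pt generalizing c acc with
  | nil => simp [pvGo, pvS]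
  | cons hd tl ih =>
      obtain ⟨id, s⟩ := hd
      have hs : c + pvS ((id, s) :: tl)
          = (c + ((PySem.Str.len s : Int) + 1)) + pvS tl := by
        simp [pvS, List.sum_cons]; ring
      rw [List.reverse_cons, List.foldl_append, hs,
        ih (c + ((PySem.Str.len s : Int) + 1)) acc]
      simp only [List.foldl_cons, List.foldl_nil, pvGo]
      have he : c + ((PySem.Str.len s : Int) + 1) - ((PySem.Str.len s : Int) + 1) = c := by ring
      rw [he]
      split_ifs with h
      · simp [add_assoc]
      · simp [add_assoc]

-- ===== VERDICT (by name: the statement is the Claim_ definition above) =====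
theorem get_node_ids_spec : Claim_equal_get_node_ids := by
  intro pt wp _
  unfold Spec_get_node_ids get_node_ids get_node_ids_alt
  rw [pvA_go]
  have h := pvB_go pt (wp.1 - 1) (wp.2 + 1) 0 []
  rw [zero_add] at h
  simp only [pvTotal pt 0, zero_add, h]
  simp
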